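-- pv_equiv track=rewrite | github.com/Signetar/Novar | novar.py | average_stuck_keyboard_enjoyer
-- ===== SOURCE A (Python) =====
-- corresponding2 = {
--         'i': ['1', 'i', 'l', '!'],
--         'l': ['1', 'i', 'l', '!'],
--         'r': ['2', 'r'],
--         'e': ['3', 'e'],
--         'a': ['4', 'a', '@'],
--         's': ['5', 's', '$'],
--         'b': ['6', 'b'],
--         't': ['7', 't', '+'],
--         'o': ['0', 'o'],
--         'c': ['(', 'c']
-- }
--
-- def compare(typed_char, target_char, corresponding=corresponding2) -> bool:
--     """Returns whether the typed character could stand in for the target character."""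
--
--     if target_char in corresponding.keys():
--         return typed_char in corresponding[target_char]
--     return target_char == typed_char
--
-- def average_stuck_keyboard_enjoyer(typed, target, corresponding=corresponding2) -> bool:
--     """
--     Returns True if what was typed is the target word, when recurring characters
--     and stand-ins are disregarded. (sorry in advance)
--     """
--     typed = typed.lower()
--     target = target.lower()
--     i = 0  # target pointer
--     j = 0  # typed pointer
--     if len(target) == 0 and len(typed) != 0:
--         return False
--     if len(typed) < len(target):
--         return False
--     while j < len(typed):
--         if not compare(typed[j], target[i], corresponding):
--             return False
--         if i == len(target)-1:
--             break
--         if j == len(typed)-1: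
--             return False
--         if compare(typed[j+1], target[i+1], corresponding):
--             j += 1
--             i += 1
--         elif compare(typed[j+1], target[i], corresponding):
--             j += 1
--         else:
--             return False
--
--     while j != len(typed):
--         if not compare(typed[j], target[-1], corresponding):
--             return False
--         j += 1
--
--     return True
-- ===== SOURCE B (Python) =====
-- corresponding2 = {
--         'i': ['1', 'i', 'l', '!'],
--         'l': ['1', 'i', 'l', '!'],
--         'r': ['2', 'r'],
--         'e': ['3', 'e'],
--         'a': ['4', 'a', '@'],
--         's': ['5', 's', '$'],
--         'b': ['6', 'b'],
--         't': ['7', 't', '+'],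
--         'o': ['0', 'o'],
--         'c': ['(', 'c']
-- }
--
-- def compare(typed_char, target_char, corresponding=corresponding2) -> bool:
--     if target_char in corresponding.keys():
--         return typed_char in corresponding[target_char]
--     return target_char == typed_char
--
-- def average_stuck_keyboard_enjoyer(typed, target, corresponding=corresponding2) -> bool:
--     typed = typed.lower()
--     target = target.lower()
--     if not target:
--         return not typed
--     if not typed:
--         return False
--     # Phase 1: assign each typed position a target index by the greedy
--     # "advance when the char matches the next target char" rule.
--     i = 0
--     labels = [0]
--     for ch in typed[1:]:
--         if i < len(target) - 1 and compare(ch, target[i + 1], corresponding):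
--             i += 1
--         labels.append(i)
--     # Phase 2: every char must match its assigned target char, and the
--     # labelling must have consumed the whole target.
--     return i == len(target) - 1 and all(
--         compare(ch, target[k], corresponding) for ch, k in zip(typed, labels))
-- ===== Notes on version B (the rewrite author's own statement) =====
-- stated objective: simpler
-- what changed: A's two-pointer lookahead while-loop with four early returns, a break and a second cleanup loop is replaced by a two-phase scan: one pass assigns every typed char a target index by the advance-on-next-match rule, a second pass verifies all chars against their assigned target char and that the whole target was consumed.
import Mathlib
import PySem

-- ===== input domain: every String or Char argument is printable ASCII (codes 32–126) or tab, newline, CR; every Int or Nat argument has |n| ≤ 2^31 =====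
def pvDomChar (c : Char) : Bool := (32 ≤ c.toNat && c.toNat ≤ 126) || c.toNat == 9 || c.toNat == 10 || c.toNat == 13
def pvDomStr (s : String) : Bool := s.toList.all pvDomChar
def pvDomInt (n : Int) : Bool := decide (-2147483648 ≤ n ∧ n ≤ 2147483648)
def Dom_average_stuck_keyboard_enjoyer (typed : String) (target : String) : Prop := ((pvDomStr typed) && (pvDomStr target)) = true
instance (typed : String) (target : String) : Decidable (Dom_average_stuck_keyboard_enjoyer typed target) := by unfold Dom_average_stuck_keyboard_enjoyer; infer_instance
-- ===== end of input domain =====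

-- B replaces A's two-pointer lookahead loop (with early returns and a second cleanup loop)
-- by a two-phase scan — one pass assigning each typed char a target index, one pass verifying —
-- for simplicity; same return value on every input.

-- ===== PORT A =====

-- the module-level dict corresponding2 (insertion order; keys are the 1-char strings shown)
def pvCorr : List (Char × List Char) :=
  [('i', ['1','i','l','!']), ('l', ['1','i','l','!']), ('r', ['2','r']), ('e', ['3','e']),
   ('a', ['4','a','@']), ('s', ['5','s','$']), ('b', ['6','b']), ('t', ['7','t','+']),
   ('o', ['0','o']), ('c', ['(','c'])]

-- compare(typed_char, target_char): dict-key membership then list membership, else equality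
def pvCompare (typed_char target_char : Char) : Bool :=
  match pvCorr.find? (fun p => p.1 == target_char) with
  | some p => p.2.contains typed_char
  | none => target_char == typed_char

-- the second while loop: while j != len(typed): check typed[j] against target[-1]
-- (guard written j < len: j never exceeds len(typed) — Python's `j != len` is the same there)
def pvLoop2A (tl tg : List Char) (j : Nat) : Bool :=
  if _h : j < tl.length then
    if ¬ pvCompare (tl.getD j ' ') ((PySem.List.pyGetD tg (-1) ' ')) then false
    else pvLoop2A tl tg (j + 1)
  else true
termination_by tl.length - j

-- the main while loop over pointers i (target) and j (typed); indices are always in range,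
-- so typed[j]/target[i] are ported with List.getD (exact there)
def pvMainA (tl tg : List Char) (i j : Nat) : Bool :=
  if _h : j < tl.length then
    if ¬ pvCompare (tl.getD j ' ') (tg.getD i ' ') then false
    else if i = tg.length - 1 then pvLoop2A tl tg j          -- break → second loop
    else if j = tl.length - 1 then false
    else if pvCompare (tl.getD (j + 1) ' ') (tg.getD (i + 1) ' ') then pvMainA tl tg (i + 1) (j + 1)
    else if pvCompare (tl.getD (j + 1) ' ') (tg.getD i ' ') then pvMainA tl tg i (j + 1)
    else false
  else pvLoop2A tl tg j
termination_by tl.length - j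

def average_stuck_keyboard_enjoyer (typed : String) (target : String) : Bool :=
  let tl := (PySem.Str.lower typed).toList
  let tg := (PySem.Str.lower target).toList
  if tg.length = 0 ∧ tl.length ≠ 0 then false
  else if tl.length < tg.length then false
  else pvMainA tl tg 0 0

-- ===== PORT B =====

-- one fold step of phase 1: advance the target index when the char matches the NEXT
-- target char, and record the label
def pvAltStep (tg : List Char) (s : Nat × List Nat) (ch : Char) : Nat × List Nat :=
  let i' := if decide (s.1 < tg.length - 1) && pvCompare ch (tg.getD (s.1 + 1) ' ') then s.1 + 1 else s.1
  (i', s.2 ++ [i'])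

def average_stuck_keyboard_enjoyer_alt (typed : String) (target : String) : Bool :=
  let tl := (PySem.Str.lower typed).toList
  let tg := (PySem.Str.lower target).toList
  if tg.isEmpty then tl.isEmpty
  else if tl.isEmpty then false
  else
    let st := tl.tail.foldl (pvAltStep tg) (0, [0])   -- phase 1 over typed[1:]
    decide (st.1 = tg.length - 1) &&
      (tl.zip st.2).all (fun p => pvCompare p.1 (tg.getD p.2 ' '))   -- phase 2

-- ===== PRECONDITION & SPEC =====
def Spec_average_stuck_keyboard_enjoyer (typed : String) (target : String) (out : Bool) : Prop := out = average_stuck_keyboard_enjoyer_alt typed target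
instance (typed : String) (target : String) (out : Bool) : Decidable (Spec_average_stuck_keyboard_enjoyer typed target out) := by unfold Spec_average_stuck_keyboard_enjoyer; infer_instance

-- ===== CLAIM (what is proved, stated in full; the proofs are below) =====
def Claim_equal_average_stuck_keyboard_enjoyer : Prop := ∀ (typed : String) (target : String), Dom_average_stuck_keyboard_enjoyer typed target → Spec_average_stuck_keyboard_enjoyer typed target (average_stuck_keyboard_enjoyer typed target)

-- ===== LEMMAS AND PROOFS =====

-- proof-only recursive views of B's phase-1 label advance and phase-2 check
def pvStep (tg : List Char) (i : Nat) (d : Char) : Nat :=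
  if decide (i < tg.length - 1) && pvCompare d (tg.getD (i + 1) ' ') then i + 1 else i

def pvIdx (tg : List Char) (i : Nat) : List Char → Nat
  | [] => i
  | d :: ds => pvIdx tg (pvStep tg i d) ds

def pvLabs (tg : List Char) (i : Nat) : List Char → List Nat
  | [] => []
  | d :: ds => pvStep tg i d :: pvLabs tg (pvStep tg i d) ds

def pvChk (tg : List Char) (i : Nat) : List Char → Bool
  | [] => true
  | d :: ds => pvCompare d (tg.getD (pvStep tg i d) ' ') && pvChk tg (pvStep tg i d) ds

theorem pvFold_eq (tg : List Char) (rest : List Char) : ∀ (i : Nat) (acc : List Nat),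
    rest.foldl (pvAltStep tg) (i, acc) = (pvIdx tg i rest, acc ++ pvLabs tg i rest) := by
  induction rest with
  | nil => intro i acc; simp [pvIdx, pvLabs]
  | cons d ds ih =>
    intro i acc
    rw [List.foldl_cons, ih]
    simp [pvAltStep, pvIdx, pvLabs, pvStep]

theorem pvZip_eq (tg : List Char) (rest : List Char) : ∀ (i : Nat),
    (rest.zip (pvLabs tg i rest)).all (fun p => pvCompare p.1 (tg.getD p.2 ' ')) = pvChk tg i rest := by
  induction rest with
  | nil => intro i; simp [pvLabs, pvChk]
  | cons d ds ih =>
    intro i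
    rw [pvLabs, List.zip_cons_cons, List.all_cons, pvChk, ih]

theorem pvIdx_le (tg : List Char) (rest : List Char) : ∀ (i : Nat), pvIdx tg i rest ≤ i + rest.length := by
  induction rest with
  | nil => intro i; simp [pvIdx]
  | cons d ds ih =>
    intro i
    rw [pvIdx]
    refine le_trans (ih _) ?_
    have : pvStep tg i d ≤ i + 1 := by unfold pvStep; split <;> omega
    simp only [List.length_cons]; omega

theorem pvLoop2_eq (tl tg : List Char) (j : Nat) (hj : j ≤ tl.length) :
    pvLoop2A tl tg j = (tl.drop j).all (fun c => pvCompare c (PySem.List.pyGetD tg (-1) ' ')) := by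
  by_cases h : j < tl.length
  · rw [pvLoop2A, dif_pos h]
    have hdrop : tl.drop j = tl.getD j ' ' :: tl.drop (j + 1) := by
      rw [List.getD_eq_getElem tl ' ' h]; exact List.drop_eq_getElem_cons h
    rw [hdrop, List.all_cons, pvLoop2_eq tl tg (j + 1) (by omega)]
    cases pvCompare (tl.getD j ' ') (PySem.List.pyGetD tg (-1) ' ') <;> simp
  · have hj' : j = tl.length := by omega
    rw [pvLoop2A, dif_neg h, hj', List.drop_length, List.all_nil]
termination_by tl.length - j

theorem pvLast_eq (tg : List Char) (h : tg ≠ []) :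
    PySem.List.pyGetD tg (-1) ' ' = tg.getD (tg.length - 1) ' ' := by
  rw [PySem.List.pyGetD_neg_one tg ' ' h, List.getLast_eq_getElem]
  rw [List.getD_eq_getElem tg ' ' (by have := List.length_pos_of_ne_nil h; omega)]

-- when i is already the last target index, phase 1 never advances
theorem pvStep_last (tg : List Char) (i : Nat) (d : Char) (hi : i = tg.length - 1) :
    pvStep tg i d = i := by
  unfold pvStep
  rw [if_neg]
  simp only [Bool.and_eq_true, decide_eq_true_eq, not_and]
  omega

theorem pvChk_last (tg : List Char) (rest : List Char) : ∀ i, i = tg.length - 1 →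
    pvChk tg i rest = rest.all (fun c => pvCompare c (tg.getD i ' ')) := by
  induction rest with
  | nil => intro i _; simp [pvChk]
  | cons d ds ih =>
    intro i hi
    rw [pvChk, pvStep_last tg i d hi, List.all_cons, ih i hi]

theorem pvIdx_last (tg : List Char) (rest : List Char) : ∀ i, i = tg.length - 1 →
    pvIdx tg i rest = i := by
  induction rest with
  | nil => intro i _; rfl
  | cons d ds ih =>
    intro i hi
    rw [pvIdx, pvStep_last tg i d hi, ih i hi]

-- the main loop equals B's "check every label, and the labels exhaust the target" reading
theorem pvMain_eq (tl tg : List Char) (i j : Nat) (hj : j < tl.length) (hi : i < tg.length) :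
    pvMainA tl tg i j =
      (pvCompare (tl.getD j ' ') (tg.getD i ' ') && pvChk tg i (tl.drop (j + 1)) &&
        decide (pvIdx tg i (tl.drop (j + 1)) = tg.length - 1)) := by
  have htg : tg ≠ [] := by intro h; subst h; simp at hi
  rw [pvMainA, dif_pos hj]
  cases hc : pvCompare (tl.getD j ' ') (tg.getD i ' ')
  · simp
  · rw [if_neg (by simp), Bool.true_and]
    by_cases hlast : i = tg.length - 1
    · rw [if_pos hlast, pvLoop2_eq tl tg j (by omega)]
      have hdrop : tl.drop j = tl.getD j ' ' :: tl.drop (j + 1) := by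
        rw [List.getD_eq_getElem tl ' ' hj]; exact List.drop_eq_getElem_cons hj
      rw [hdrop, List.all_cons, pvLast_eq tg htg, ← hlast, hc, Bool.true_and]
      rw [pvChk_last tg _ i hlast, pvIdx_last tg _ i hlast]
      simp
    · rw [if_neg hlast]
      by_cases hjlast : j = tl.length - 1
      · have hdrop : tl.drop (j + 1) = [] := by
          apply List.drop_eq_nil_of_le; omega
        rw [if_pos hjlast, hdrop]
        have h1 : pvIdx tg i [] = i := rfl
        have h2 : pvChk tg i [] = true := rfl
        rw [h1, h2, decide_eq_false hlast]
        simp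
      · rw [if_neg hjlast]
        have hj1 : j + 1 < tl.length := by omega
        have hdrop : tl.drop (j + 1) = tl.getD (j + 1) ' ' :: tl.drop (j + 2) := by
          rw [List.getD_eq_getElem tl ' ' hj1]; exact List.drop_eq_getElem_cons hj1
        have hguard : i < tg.length - 1 := by omega
        rw [hdrop, pvChk, pvIdx]
        cases hadv : pvCompare (tl.getD (j + 1) ' ') (tg.getD (i + 1) ' ')
        · have hstep : pvStep tg i (tl.getD (j + 1) ' ') = i := by
            unfold pvStep; rw [hadv, Bool.and_false]; rfl
          rw [if_neg (by simp), hstep]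
          cases hstay : pvCompare (tl.getD (j + 1) ' ') (tg.getD i ' ')
          · rw [if_neg (by simp)]
            simp
          · rw [if_pos rfl, pvMain_eq tl tg i (j + 1) hj1 hi, hstay, Bool.true_and]
        · have hstep : pvStep tg i (tl.getD (j + 1) ' ') = i + 1 := by
            unfold pvStep
            rw [hadv, Bool.and_true, if_pos (decide_eq_true hguard)]
          rw [if_pos rfl, hstep, pvMain_eq tl tg (i + 1) (j + 1) hj1 (by omega), hadv,
            Bool.true_and]
termination_by tl.length - j

-- ===== VERDICT (by name: the statement is the Claim_ definition above) =====
theorem average_stuck_keyboard_enjoyer_spec : Claim_equal_average_stuck_keyboard_enjoyer := by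
  intro typed target _
  unfold Spec_average_stuck_keyboard_enjoyer average_stuck_keyboard_enjoyer average_stuck_keyboard_enjoyer_alt
  generalize (PySem.Str.lower typed).toList = tl
  generalize (PySem.Str.lower target).toList = tg
  match tg, tl with
  | [], [] => simp [pvMainA, pvLoop2A]
  | [], (c :: cs) => simp
  | (g :: gs), [] => simp
  | (g :: gs), (c :: cs) =>
    rw [if_neg (show ¬((g :: gs).length = 0 ∧ (c :: cs).length ≠ 0) by simp)]
    rw [if_neg (show ¬((g :: gs).isEmpty = true) by simp)]
    rw [if_neg (show ¬((c :: cs).isEmpty = true) by simp)]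
    rw [List.tail_cons, pvFold_eq]
    simp only [List.singleton_append, List.zip_cons_cons, List.all_cons]
    rw [pvZip_eq, List.getD_cons_zero]
    by_cases hlen : (c :: cs).length < (g :: gs).length
    · rw [if_pos hlen]
      have hidx := pvIdx_le (g :: gs) cs 0
      have hne : ¬ (pvIdx (g :: gs) 0 cs = (g :: gs).length - 1) := by
        simp only [List.length_cons] at hlen hidx ⊢; omega
      rw [decide_eq_false hne, Bool.false_and]
    · rw [if_neg hlen]
      rw [pvMain_eq (c :: cs) (g :: gs) 0 0 (by simp) (by simp)]
      have hdrop : (c :: cs).drop 1 = cs := rfl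
      rw [hdrop, List.getD_cons_zero, List.getD_cons_zero]
      cases pvCompare c g <;> cases pvChk (g :: gs) 0 cs <;>
        cases hC : decide (pvIdx (g :: gs) 0 cs = (g :: gs).length - 1) <;> simp_all
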